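-- pv_equiv track=rewrite | github.com/GHines6/CSE-1321L-Solutions-2025 | Assignments/Assignment4A.py | convert_to_pascal_case
-- ===== SOURCE A (Python) =====
-- def format_word(word):
--     capitalized = word.upper()
--     pascalword = ""
--     first = True
--     for ch in capitalized:
--         if first == False:
--             pascalword += ch.lower()
--         else:
--             pascalword += ch.upper()
--             first = False
--     return(pascalword)
--
-- def convert_to_pascal_case(text):
--     word = ""
--     pascaltext = ""
--     for ch in text + " ":
--         if ch != " ":
--             word += ch.lower()
--         else:
--             pascaltext += format_word(word)
--             word = ""
--     return(pascaltext)
-- ===== SOURCE B (Python) =====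
-- def convert_to_pascal_case(text):
--     return "".join(w[:1].upper() + w[1:].lower() for w in text.split(" "))
-- ===== Notes on version B (the rewrite author's own statement) =====
-- stated objective: simpler
-- what changed: Replaces A's manual character-scanning space split and per-word recasing loops by one library split on the space character plus slice-based recasing of each segment (first char uppered, rest lowered), concatenated with a join.
import Mathlib
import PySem

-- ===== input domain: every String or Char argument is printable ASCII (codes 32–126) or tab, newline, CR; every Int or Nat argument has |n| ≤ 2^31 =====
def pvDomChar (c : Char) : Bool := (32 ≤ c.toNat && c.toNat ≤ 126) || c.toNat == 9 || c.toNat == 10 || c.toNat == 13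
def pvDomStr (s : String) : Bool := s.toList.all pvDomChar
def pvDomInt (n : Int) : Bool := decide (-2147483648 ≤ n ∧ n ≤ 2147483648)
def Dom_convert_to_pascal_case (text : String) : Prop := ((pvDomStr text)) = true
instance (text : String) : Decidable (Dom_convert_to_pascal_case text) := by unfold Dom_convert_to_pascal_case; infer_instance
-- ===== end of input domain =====

-- B replaces A's nested character-scanning loops by one split on " " plus slice-based
-- re-casing of each segment (objective: simpler).

-- ===== PORT A =====
-- port of A's helper format_word: fold over word.upper() with state (pascalword, first)
def format_word (word : List Char) : List Char :=
  let capitalized := PySem.Chars.upper word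
  (capitalized.foldl
    (fun (s : List Char × Bool) ch =>
      if s.2 == false then (s.1 ++ [PySem.Chars.lowerChar ch], s.2)
      else (s.1 ++ [PySem.Chars.upperChar ch], false))
    ([], true)).1

-- fold over text + " " with state (word, pascaltext)
def convert_to_pascal_case (text : String) : String :=
  String.ofList (((text.toList ++ [' ']).foldl
    (fun (s : List Char × List Char) ch =>
      if ch != ' ' then (s.1 ++ [PySem.Chars.lowerChar ch], s.2)
      else ([], s.2 ++ format_word s.1))
    ([], [])).2)

-- ===== PORT B =====
-- w[:1].upper() + w[1:].lower()
def pascal_seg (w : List Char) : List Char :=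
  PySem.Chars.upper (PySem.List.slice w none (some 1)) ++
    PySem.Chars.lower (PySem.List.slice w (some 1) none)

-- "".join(... for w in text.split(" "))
def convert_to_pascal_case_alt (text : String) : String :=
  String.ofList (PySem.Chars.join []
    ((PySem.Chars.splitOn text.toList [' ']).map pascal_seg))

-- ===== PRECONDITION & SPEC =====
def Spec_convert_to_pascal_case (text : String) (out : String) : Prop := out = convert_to_pascal_case_alt text
instance (text : String) (out : String) : Decidable (Spec_convert_to_pascal_case text out) := by unfold Spec_convert_to_pascal_case; infer_instance

-- ===== CLAIM (what is proved, stated in full; the proofs are below) =====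
def Claim_equal_convert_to_pascal_case : Prop := ∀ (text : String), Dom_convert_to_pascal_case text → Spec_convert_to_pascal_case text (convert_to_pascal_case text)

-- ===== LEMMAS AND PROOFS =====

-- character-level case facts
lemma pvIsupper_iff (c : Char) : PySem.Chars.isupper c = true ↔ 65 ≤ c.toNat ∧ c.toNat ≤ 90 := by
  simp [PySem.Chars.isupper, Char.le_def, UInt32.le_iff_toNat_le]

lemma pvIslower_iff (c : Char) : PySem.Chars.islower c = true ↔ 97 ≤ c.toNat ∧ c.toNat ≤ 122 := by
  simp [PySem.Chars.islower, Char.le_def, UInt32.le_iff_toNat_le]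

lemma pvToNat_ofNat_small (n : Nat) (h : n < 55296) : (Char.ofNat n).toNat = n := by
  rw [Char.toNat_ofNat, if_pos (Or.inl h)]

lemma pvLowerChar_of_upper (c : Char) (h : 65 ≤ c.toNat ∧ c.toNat ≤ 90) :
    PySem.Chars.lowerChar c = Char.ofNat (c.toNat + 32) := by
  unfold PySem.Chars.lowerChar
  rw [if_pos ((pvIsupper_iff c).2 h)]

lemma pvLowerChar_of_not_upper (c : Char) (h : ¬ (65 ≤ c.toNat ∧ c.toNat ≤ 90)) :
    PySem.Chars.lowerChar c = c := by
  unfold PySem.Chars.lowerChar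
  rw [if_neg (by rw [pvIsupper_iff]; exact h)]

lemma pvUpperChar_of_lower (c : Char) (h : 97 ≤ c.toNat ∧ c.toNat ≤ 122) :
    PySem.Chars.upperChar c = Char.ofNat (c.toNat - 32) := by
  unfold PySem.Chars.upperChar
  rw [if_pos ((pvIslower_iff c).2 h)]

lemma pvUpperChar_of_not_lower (c : Char) (h : ¬ (97 ≤ c.toNat ∧ c.toNat ≤ 122)) :
    PySem.Chars.upperChar c = c := by
  unfold PySem.Chars.upperChar
  rw [if_neg (by rw [pvIslower_iff]; exact h)]

lemma pvUpper_upper_lower (c : Char) :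
    PySem.Chars.upperChar (PySem.Chars.upperChar (PySem.Chars.lowerChar c)) = PySem.Chars.upperChar c := by
  by_cases hu : 65 ≤ c.toNat ∧ c.toNat ≤ 90
  · have ht : (Char.ofNat (c.toNat + 32)).toNat = c.toNat + 32 := pvToNat_ofNat_small _ (by omega)
    rw [pvLowerChar_of_upper c hu,
      pvUpperChar_of_lower (Char.ofNat (c.toNat + 32)) (by rw [ht]; omega), ht,
      show c.toNat + 32 - 32 = c.toNat by omega, Char.ofNat_toNat,
      pvUpperChar_of_not_lower c (by omega)]
  · rw [pvLowerChar_of_not_upper c hu]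
    by_cases hl : 97 ≤ c.toNat ∧ c.toNat ≤ 122
    · have ht : (Char.ofNat (c.toNat - 32)).toNat = c.toNat - 32 := pvToNat_ofNat_small _ (by omega)
      rw [pvUpperChar_of_lower c hl,
        pvUpperChar_of_not_lower (Char.ofNat (c.toNat - 32)) (by rw [ht]; omega)]
    · rw [pvUpperChar_of_not_lower c hl, pvUpperChar_of_not_lower c hl]

lemma pvLower_upper_lower (c : Char) :
    PySem.Chars.lowerChar (PySem.Chars.upperChar (PySem.Chars.lowerChar c)) = PySem.Chars.lowerChar c := by
  by_cases hu : 65 ≤ c.toNat ∧ c.toNat ≤ 90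
  · have ht : (Char.ofNat (c.toNat + 32)).toNat = c.toNat + 32 := pvToNat_ofNat_small _ (by omega)
    rw [pvLowerChar_of_upper c hu,
      pvUpperChar_of_lower (Char.ofNat (c.toNat + 32)) (by rw [ht]; omega), ht,
      show c.toNat + 32 - 32 = c.toNat by omega, Char.ofNat_toNat, pvLowerChar_of_upper c hu]
  · rw [pvLowerChar_of_not_upper c hu]
    by_cases hl : 97 ≤ c.toNat ∧ c.toNat ≤ 122
    · have ht : (Char.ofNat (c.toNat - 32)).toNat = c.toNat - 32 := pvToNat_ofNat_small _ (by omega)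
      rw [pvUpperChar_of_lower c hl,
        pvLowerChar_of_upper (Char.ofNat (c.toNat - 32)) (by rw [ht]; omega), ht,
        show c.toNat - 32 + 32 = c.toNat by omega, Char.ofNat_toNat]
    · rw [pvUpperChar_of_not_lower c hl, pvLowerChar_of_not_upper c hu]

-- structural description of splitting on a single space: (first word, remaining words)
def splitSp : List Char → List Char × List (List Char)
  | [] => ([], [])
  | c :: cs =>
    if c = ' ' then ([], (splitSp cs).1 :: (splitSp cs).2)
    else (c :: (splitSp cs).1, (splitSp cs).2)

lemma pvGo_eq (fuel : Nat) : ∀ (l cur : List Char) (accs : List (List Char)), l.length ≤ fuel →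
    PySem.Chars.splitOn.go [' '] fuel l cur accs =
      accs.reverse ++ (cur.reverse ++ (splitSp l).1) :: (splitSp l).2 := by
  induction fuel with
  | zero =>
    intro l cur accs h
    have hl : l = [] := List.eq_nil_of_length_eq_zero (by omega)
    subst hl
    simp [PySem.Chars.splitOn.go, splitSp]
  | succ fuel ih =>
    intro l cur accs h
    cases l with
    | nil => simp [PySem.Chars.splitOn.go, splitSp]
    | cons c rest =>
      rw [PySem.Chars.splitOn.go]
      by_cases hc : c = ' '
      · subst hc
        rw [if_pos (by simp [List.isPrefixOf])]
        rw [ih _ _ _ (by simpa using Nat.le_of_succ_le_succ h)]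
        simp [splitSp]
      · rw [if_neg (by simp [List.isPrefixOf]; exact fun hh => hc hh.symm)]
        rw [ih _ _ _ (by simpa using Nat.le_of_succ_le_succ h)]
        simp [splitSp, hc]

lemma pvSplitOn_eq (cs : List Char) :
    PySem.Chars.splitOn cs [' '] = (splitSp cs).1 :: (splitSp cs).2 := by
  have := pvGo_eq (cs.length + 1) cs [] [] (by omega)
  simpa [PySem.Chars.splitOn] using this

-- the inner fold of format_word once first = false just lower-cases and appends
lemma pvFmt_tail (cs : List Char) : ∀ (acc : List Char),
    (cs.foldl
      (fun (s : List Char × Bool) ch =>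
        if s.2 == false then (s.1 ++ [PySem.Chars.lowerChar ch], s.2)
        else (s.1 ++ [PySem.Chars.upperChar ch], false))
      (acc, false)) = (acc ++ cs.map PySem.Chars.lowerChar, false) := by
  induction cs with
  | nil => intro acc; simp
  | cons c cs ih =>
    intro acc
    rw [List.foldl_cons]
    exact (ih (acc ++ [PySem.Chars.lowerChar c])).trans (by simp)

lemma pvFormat_word_cons (h : Char) (t : List Char) :
    format_word (h :: t) = PySem.Chars.upperChar (PySem.Chars.upperChar h) ::
      (t.map PySem.Chars.upperChar).map PySem.Chars.lowerChar := by
  unfold format_word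
  simp only [PySem.Chars.upper, List.map_cons, List.foldl_cons]
  rw [show ((if ((true : Bool) == false) = true
        then (([] : List Char) ++ [PySem.Chars.lowerChar (PySem.Chars.upperChar h)], (true : Bool))
        else ([] ++ [PySem.Chars.upperChar (PySem.Chars.upperChar h)], false)) : List Char × Bool)
      = ([PySem.Chars.upperChar (PySem.Chars.upperChar h)], false) from rfl]
  rw [pvFmt_tail]
  rfl

-- A's format_word on an already-lowered word is B's per-segment recasing
lemma pvFmt_eq (w : List Char) :
    format_word (w.map PySem.Chars.lowerChar) = pascal_seg w := by
  cases w with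
  | nil =>
    simp [format_word, pascal_seg, PySem.Chars.upper, PySem.Chars.lower, PySem.List.slice]
  | cons h t =>
    rw [List.map_cons, pvFormat_word_cons]
    unfold pascal_seg
    rw [PySem.List.slice_to (xs := h :: t) (b := 1) (by norm_num),
      PySem.List.slice_from (xs := h :: t) (a := 1) (by norm_num)]
    simp [PySem.Chars.upper, PySem.Chars.lower, List.map_map, Function.comp_def,
      pvUpper_upper_lower, pvLower_upper_lower]

-- the main loop of A, unrolled over the space-split structure
lemma pvLoopA (cs : List Char) : ∀ (w out : List Char),
    (((cs ++ [' ']).foldl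
      (fun (s : List Char × List Char) ch =>
        if ch != ' ' then (s.1 ++ [PySem.Chars.lowerChar ch], s.2)
        else ([], s.2 ++ format_word s.1))
      (w, out)).2) =
    out ++ format_word (w ++ (splitSp cs).1.map PySem.Chars.lowerChar) ++
      ((splitSp cs).2.map (fun seg => format_word (seg.map PySem.Chars.lowerChar))).flatten := by
  induction cs with
  | nil => intro w out; simp [splitSp]
  | cons c cs ih =>
    intro w out
    simp only [List.cons_append, List.foldl_cons]
    by_cases hc : c = ' '
    · subst hc
      rw [if_neg (by decide)]
      rw [ih]
      simp [splitSp]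
    · rw [if_pos (by simp [hc])]
      rw [ih]
      simp [splitSp, hc]

lemma pvJoin_nil_eq_flatten : ∀ (parts : List (List Char)),
    PySem.Chars.join [] parts = parts.flatten
  | [] => by simp [PySem.Chars.join_nil]
  | [a] => by simp [PySem.Chars.join_singleton]
  | a :: b :: t => by
    rw [PySem.Chars.join_cons_cons, pvJoin_nil_eq_flatten (b :: t)]
    simp

-- ===== VERDICT (by name: the statement is the Claim_ definition above) =====
theorem convert_to_pascal_case_spec : Claim_equal_convert_to_pascal_case := by
  intro text _
  unfold Spec_convert_to_pascal_case convert_to_pascal_case convert_to_pascal_case_alt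
  rw [pvLoopA, pvSplitOn_eq, pvJoin_nil_eq_flatten]
  simp [pvFmt_eq]
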